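-- pv_equiv track=rewrite | github.com/sii-poland-testing-cc/aiBuddy | backend/app/agents/context_builder_workflow.py | _apply_duplicate_merges
-- ===== SOURCE A (Python) =====
-- from typing import Any, Dict, List, Optional
--
-- def _apply_duplicate_merges(
--
--     entities: List[Dict],
--     relations: List[Dict],
--     duplicates: List,
-- ) -> tuple:
--     """Merge entity pairs flagged as duplicates, re-wiring relations to the kept entity."""
--     for pair in duplicates:
--         if not isinstance(pair, (list, tuple)) or len(pair) < 2:
--             continue
--         name_a, name_b = str(pair[0]), str(pair[1])
--         idx_a = next((i for i, e in enumerate(entities) if e.get("name", "").lower() == name_a.lower()), None)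
--         idx_b = next((i for i, e in enumerate(entities) if e.get("name", "").lower() == name_b.lower()), None)
--         if idx_a is None or idx_b is None or idx_a == idx_b:
--             continue
--         keep, drop = (
--             (idx_a, idx_b)
--             if len(entities[idx_a].get("description", "")) >= len(entities[idx_b].get("description", ""))
--             else (idx_b, idx_a)
--         )
--         drop_id = entities[drop]["id"]
--         keep_id = entities[keep]["id"]
--         for r in relations:
--             if r.get("source") == drop_id:
--                 r["source"] = keep_id
--             if r.get("target") == drop_id:
--                 r["target"] = keep_id
--         entities.pop(drop)
--
--     return entities, relations
-- ===== SOURCE B (Python) =====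
-- # B: alternative single-pass bookkeeping — alive flags instead of list pops, and an id-remap
-- # dict composed across merges so relations are rewritten in one final pass instead of a
-- # scan per duplicate pair.  Like A, mutates `entities` and the relation dicts in place.
-- def _apply_duplicate_merges(entities, relations, duplicates):
--     alive = [True] * len(entities)
--     remap = {}  # current-value function on ids: id -> what relations holding it should show now
--     for pair in duplicates:
--         if not isinstance(pair, (list, tuple)) or len(pair) < 2:
--             continue
--         na, nb = str(pair[0]).lower(), str(pair[1]).lower()
--         ia = next((i for i in range(len(entities))
--                    if alive[i] and entities[i].get("name", "").lower() == na), None)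
--         ib = next((i for i in range(len(entities))
--                    if alive[i] and entities[i].get("name", "").lower() == nb), None)
--         if ia is None or ib is None or ia == ib:
--             continue
--         keep, drop = (
--             (ia, ib)
--             if len(entities[ia].get("description", "")) >= len(entities[ib].get("description", ""))
--             else (ib, ia)
--         )
--         d_id = entities[drop]["id"]
--         k_id = entities[keep]["id"]
--         for k in remap:            # ids currently shown as d_id now show k_id
--             if remap[k] == d_id:
--                 remap[k] = k_id
--         if d_id not in remap:
--             remap[d_id] = k_id
--         alive[drop] = False
--     for r in relations:
--         s = r.get("source")
--         if s in remap:
--             r["source"] = remap[s]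
--         t = r.get("target")
--         if t in remap:
--             r["target"] = remap[t]
--     entities[:] = [e for e, a in zip(entities, alive) if a]
--     return entities, relations
-- ===== Notes on version B (the rewrite author's own statement) =====
-- stated objective: alternative
-- what changed: B replaces A's per-pair work (rescanning and rewriting the whole relations list and popping from the entities list on every merge) with alive flags plus an id-remap dict composed across merges, so relations are rewritten in one final pass and entities are filtered once at the end; Pre_ excludes inputs where some duplicate pair with two distinct lowercased names matches two entities of which one lacks an 'id' key, because merging such a pair raises KeyError in both A and B and whether the merge actually fires depends on merge order.
import Mathlib
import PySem

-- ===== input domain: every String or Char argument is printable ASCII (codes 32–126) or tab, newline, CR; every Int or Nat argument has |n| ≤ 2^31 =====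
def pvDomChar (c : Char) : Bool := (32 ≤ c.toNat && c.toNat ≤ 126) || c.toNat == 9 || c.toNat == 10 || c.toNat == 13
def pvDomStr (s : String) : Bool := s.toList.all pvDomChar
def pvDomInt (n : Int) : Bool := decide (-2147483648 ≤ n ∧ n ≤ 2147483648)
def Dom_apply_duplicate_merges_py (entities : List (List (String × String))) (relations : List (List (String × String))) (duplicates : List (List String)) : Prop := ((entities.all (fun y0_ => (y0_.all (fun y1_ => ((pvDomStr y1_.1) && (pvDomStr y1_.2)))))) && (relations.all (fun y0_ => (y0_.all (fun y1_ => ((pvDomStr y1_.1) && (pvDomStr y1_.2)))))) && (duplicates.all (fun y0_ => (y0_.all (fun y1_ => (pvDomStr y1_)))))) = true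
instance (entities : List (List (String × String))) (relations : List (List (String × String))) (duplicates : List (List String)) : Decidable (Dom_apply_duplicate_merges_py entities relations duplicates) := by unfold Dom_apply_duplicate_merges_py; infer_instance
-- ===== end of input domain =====

-- B is an alternative bookkeeping: alive flags and a composed id-remap dict applied to relations
-- in one final pass, instead of A's per-merge relations rescan and entity pop (equivalence is about
-- the RETURN value; both Pythons mutate their arguments in place the same way).

-- shared atomic sub-expressions of both Pythons: e.get("name","").lower() and len(e.get("description",""))
def pvName (e : List (String × String)) : String :=
  PySem.Str.lower (PySem.Dict.getD (PySem.Dict.mk e) "name" "")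
def pvDescLen (e : List (String × String)) : Int :=
  PySem.Str.len (PySem.Dict.getD (PySem.Dict.mk e) "description" "")

-- ===== PORT A =====
-- next((i for i, e in enumerate(entities) if e.get("name","").lower() == nm), None)
def pvFindIdxA (entities : List (List (String × String))) (nm : String) : Option Int :=
  ((PySem.List.enumerate entities 0).find? (fun p => pvName p.2 == nm)).map (·.1)

-- the body of A's inner `for r in relations` loop: two conditional in-place assignments
def pvRewireA (d k : String) (r : List (String × String)) : List (String × String) :=
  let r1 := match PySem.Dict.get? (PySem.Dict.mk r) "source" with
    | some s => if s == d then (PySem.Dict.insert (PySem.Dict.mk r) "source" k).items else r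
    | none => r
  match PySem.Dict.get? (PySem.Dict.mk r1) "target" with
  | some t => if t == d then (PySem.Dict.insert (PySem.Dict.mk r1) "target" k).items else r1
  | none => r1

def pvStepA (st : List (List (String × String)) × List (List (String × String))) (pair : List String) :
    List (List (String × String)) × List (List (String × String)) :=
  if pair.length < 2 then st else
  let nameA := PySem.Str.lower (PySem.List.pyGetD pair 0 "")
  let nameB := PySem.Str.lower (PySem.List.pyGetD pair 1 "")
  match pvFindIdxA st.1 nameA, pvFindIdxA st.1 nameB with
  | some ia, some ib =>
    if ia == ib then st else
    let kd := if pvDescLen (PySem.List.pyGetD st.1 ia []) ≥ pvDescLen (PySem.List.pyGetD st.1 ib [])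
              then (ia, ib) else (ib, ia)
    match PySem.Dict.get? (PySem.Dict.mk (PySem.List.pyGetD st.1 kd.2 [])) "id",
          PySem.Dict.get? (PySem.Dict.mk (PySem.List.pyGetD st.1 kd.1 [])) "id" with
    | some dropId, some keepId =>
      let rels := st.2.map (pvRewireA dropId keepId)
      match PySem.List.pop? st.1 kd.2 with   -- entities.pop(drop); index is in range
      | some pr => (pr.2, rels)
      | none => (st.1, rels)
    | _, _ => st   -- KeyError on entities[...]["id"]: excluded by Pre_
  | _, _ => st

def apply_duplicate_merges_py (entities : List (List (String × String))) (relations : List (List (String × String))) (duplicates : List (List String)) : (List (List (String × String))) × (List (List (String × String))) :=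
  duplicates.foldl pvStepA (entities, relations)

-- ===== PORT B =====
-- next((i for i in range(len(entities)) if alive[i] and entities[i].get("name","").lower() == nm), None)
def pvFirstAlive (entities : List (List (String × String))) (alive : List Bool) (nm : String) : Option Nat :=
  (List.range entities.length).find? (fun i => alive.getD i false && (pvName (entities.getD i []) == nm))

-- for k in remap: if remap[k]==d: remap[k]=k ; if d not in remap: remap[d]=k
def pvRemapStep (remap : PySem.Dict String String) (d k : String) : PySem.Dict String String :=
  let r1 := PySem.Dict.mk (remap.items.map (fun p => if p.2 == d then (p.1, k) else p))
  if r1.contains d then r1 else PySem.Dict.mk (r1.items ++ [(d, k)])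

def pvStepB (entities : List (List (String × String)))
    (st : List Bool × PySem.Dict String String) (pair : List String) :
    List Bool × PySem.Dict String String :=
  if pair.length < 2 then st else
  let na := PySem.Str.lower (PySem.List.pyGetD pair 0 "")
  let nb := PySem.Str.lower (PySem.List.pyGetD pair 1 "")
  match pvFirstAlive entities st.1 na, pvFirstAlive entities st.1 nb with
  | some ia, some ib =>
    if ia == ib then st else
    let kd := if pvDescLen (entities.getD ia []) ≥ pvDescLen (entities.getD ib [])
              then (ia, ib) else (ib, ia)
    match PySem.Dict.get? (PySem.Dict.mk (entities.getD kd.2 [])) "id",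
          PySem.Dict.get? (PySem.Dict.mk (entities.getD kd.1 [])) "id" with
    | some dId, some kId => (st.1.set kd.2 false, pvRemapStep st.2 dId kId)
    | _, _ => st   -- KeyError: excluded by Pre_
  | _, _ => st

-- s = r.get("source"); if s in remap: r["source"] = remap[s]  (None is never a key of remap)
def pvApplyRemap (remap : PySem.Dict String String) (r : List (String × String)) : List (String × String) :=
  let r1 := match PySem.Dict.get? (PySem.Dict.mk r) "source" with
    | some s => match PySem.Dict.get? remap s with
      | some v => (PySem.Dict.insert (PySem.Dict.mk r) "source" v).items
      | none => r
    | none => r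
  match PySem.Dict.get? (PySem.Dict.mk r1) "target" with
  | some t => match PySem.Dict.get? remap t with
    | some v => (PySem.Dict.insert (PySem.Dict.mk r1) "target" v).items
    | none => r1
  | none => r1

-- [e for e, a in zip(entities, alive) if a]
def pvAliveFilter (entities : List (List (String × String))) (alive : List Bool) : List (List (String × String)) :=
  ((entities.zip alive).filter (·.2)).map (·.1)

def apply_duplicate_merges_py_alt (entities : List (List (String × String))) (relations : List (List (String × String))) (duplicates : List (List String)) : (List (List (String × String))) × (List (List (String × String))) :=
  let fin := duplicates.foldl (pvStepB entities) (List.replicate entities.length true, PySem.Dict.empty)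
  (pvAliveFilter entities fin.1, relations.map (pvApplyRemap fin.2))

-- ===== PRECONDITION & SPEC =====
-- Pre_ excludes inputs on which some duplicate pair with two DISTINCT lowercased names matches two
-- entities of which one lacks an "id" key: merging such a pair reads entity["id"], so A raises
-- KeyError there (Python B raises the same way), and whether the merge actually fires depends on
-- the merge order, so this whole malformed region is excluded — see claim.json "cites".
def Pre_apply_duplicate_merges_py (entities : List (List (String × String))) (relations : List (List (String × String))) (duplicates : List (List String)) : Prop :=
  ∀ pair ∈ duplicates, 2 ≤ pair.length →
    PySem.Str.lower (pair.getD 0 "") ≠ PySem.Str.lower (pair.getD 1 "") →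
    ∀ e1 ∈ entities, ∀ e2 ∈ entities,
      pvName e1 = PySem.Str.lower (pair.getD 0 "") →
      pvName e2 = PySem.Str.lower (pair.getD 1 "") →
      (PySem.Dict.mk e1).contains "id" = true ∧ (PySem.Dict.mk e2).contains "id" = true
instance (entities : List (List (String × String))) (relations : List (List (String × String))) (duplicates : List (List String)) : Decidable (Pre_apply_duplicate_merges_py entities relations duplicates) := by unfold Pre_apply_duplicate_merges_py; infer_instance

def pvWitness_apply_duplicate_merges_py : (List (List (String × String))) × (List (List (String × String))) × List (List String) :=
  ([[("id", "1"), ("name", "Foo"), ("description", "dd")], [("id", "2"), ("name", "bar")]],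
   [[("source", "2"), ("target", "1")]],
   [["foo", "BAR"]])

def Spec_apply_duplicate_merges_py (entities : List (List (String × String))) (relations : List (List (String × String))) (duplicates : List (List String)) (out : (List (List (String × String))) × (List (List (String × String)))) : Prop := out = apply_duplicate_merges_py_alt entities relations duplicates
instance (entities : List (List (String × String))) (relations : List (List (String × String))) (duplicates : List (List String)) (out : (List (List (String × String))) × (List (List (String × String)))) : Decidable (Spec_apply_duplicate_merges_py entities relations duplicates out) := by unfold Spec_apply_duplicate_merges_py; infer_instance

-- ===== CLAIM (what is proved, stated in full; the proofs are below) =====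
def Claim_equal_apply_duplicate_merges_py : Prop := ∀ (entities : List (List (String × String))) (relations : List (List (String × String))) (duplicates : List (List String)), Dom_apply_duplicate_merges_py entities relations duplicates → Pre_apply_duplicate_merges_py entities relations duplicates → Spec_apply_duplicate_merges_py entities relations duplicates (apply_duplicate_merges_py entities relations duplicates)

-- ===== LEMMAS AND PROOFS =====

-- ---------- generic helpers ----------
theorem pv_beq_comm (a b : String) : (a == b) = (b == a) := by
  by_cases h : a = b
  · simp [h]
  · have h1 : (a == b) = false := by simpa using h
    have h2 : (b == a) = false := by simpa using Ne.symm h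
    rw [h1, h2]

-- ---------- dict layer: the remap composition and per-field rewrites ----------
def pvSetAll (key v : String) (r : List (String × String)) : List (String × String) :=
  r.map (fun p => if p.1 == key then (key, v) else p)

theorem pv_get?_mk_mapVal (l : List (String × String)) (f : String → String) (x : String) :
    PySem.Dict.get? (PySem.Dict.mk (l.map (fun p => (p.1, f p.2)))) x
      = (PySem.Dict.get? (PySem.Dict.mk l) x).map f := by
  induction l with
  | nil => simp [PySem.Dict.get?]
  | cons p t ih =>
    obtain ⟨a, b⟩ := p
    rw [List.map_cons, PySem.Dict.get?_mk_cons, PySem.Dict.get?_mk_cons]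
    by_cases h : (a == x) <;> simp [h, ih]

theorem pv_get?_mk_append (l1 l2 : List (String × String)) (x : String) :
    PySem.Dict.get? (PySem.Dict.mk (l1 ++ l2)) x
      = (PySem.Dict.get? (PySem.Dict.mk l1) x).or (PySem.Dict.get? (PySem.Dict.mk l2) x) := by
  induction l1 with
  | nil => simp [PySem.Dict.get?]
  | cons p t ih =>
    obtain ⟨a, b⟩ := p
    rw [List.cons_append, PySem.Dict.get?_mk_cons, PySem.Dict.get?_mk_cons]
    by_cases h : (a == x) <;> simp [h, ih]

theorem pv_get?_setAll_self (r : List (String × String)) (key v : String) :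
    PySem.Dict.get? (PySem.Dict.mk (pvSetAll key v r)) key
      = (PySem.Dict.get? (PySem.Dict.mk r) key).map (fun _ => v) := by
  induction r with
  | nil => simp [pvSetAll, PySem.Dict.get?]
  | cons p t ih =>
    obtain ⟨a, b⟩ := p
    by_cases h : (a == key)
    · have ha : a = key := eq_of_beq h
      simp only [pvSetAll, List.map_cons, if_pos h]
      rw [PySem.Dict.get?_mk_cons, PySem.Dict.get?_mk_cons, ha]
      simp
    · simp only [pvSetAll, List.map_cons, if_neg (show ¬((a == key) = true) from h)]
      rw [PySem.Dict.get?_mk_cons, PySem.Dict.get?_mk_cons]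
      have hf : (a == key) = false := by simpa using h
      rw [hf]
      simp only [Bool.false_eq_true, if_false]
      exact ih

theorem pv_get?_setAll_ne (r : List (String × String)) (key v x : String) (hx : x ≠ key) :
    PySem.Dict.get? (PySem.Dict.mk (pvSetAll key v r)) x
      = PySem.Dict.get? (PySem.Dict.mk r) x := by
  induction r with
  | nil => simp [pvSetAll]
  | cons p t ih =>
    obtain ⟨a, b⟩ := p
    by_cases h : (a == key)
    · have ha : a = key := eq_of_beq h
      simp only [pvSetAll, List.map_cons, if_pos h]
      rw [PySem.Dict.get?_mk_cons, PySem.Dict.get?_mk_cons]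
      have h1 : (key == x) = false := by simpa using (Ne.symm hx)
      have h2 : (a == x) = false := by rw [ha]; exact h1
      rw [h1, h2]
      simp only [Bool.false_eq_true, if_false]
      exact ih
    · simp only [pvSetAll, List.map_cons, if_neg (show ¬((a == key) = true) from h)]
      rw [PySem.Dict.get?_mk_cons, PySem.Dict.get?_mk_cons]
      cases h2 : (a == x)
      · simp only [Bool.false_eq_true, if_false]
        exact ih
      · simp

theorem pv_setAll_setAll (r : List (String × String)) (key v w : String) :
    pvSetAll key w (pvSetAll key v r) = pvSetAll key w r := by
  simp only [pvSetAll, List.map_map]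
  apply List.map_congr_left
  intro p _
  by_cases h : p.1 = key <;> simp [h]

theorem pv_setAll_comm (r : List (String × String)) (k1 k2 v w : String) (h12 : k1 ≠ k2) :
    pvSetAll k1 v (pvSetAll k2 w r) = pvSetAll k2 w (pvSetAll k1 v r) := by
  simp only [pvSetAll, List.map_map]
  apply List.map_congr_left
  intro p _
  by_cases h1 : p.1 = k1
  · simp [h1, h12, Ne.symm h12]
  · by_cases h2 : p.1 = k2
    · simp [h1, h2, h12, Ne.symm h12]
    · simp [h1, h2]

theorem pv_insert_items_eq_setAll (r : List (String × String)) (key v s : String)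
    (h : PySem.Dict.get? (PySem.Dict.mk r) key = some s) :
    (PySem.Dict.insert (PySem.Dict.mk r) key v).items = pvSetAll key v r := by
  have hc : (PySem.Dict.mk r).contains key = true := by
    rw [PySem.Dict.contains_eq_isSome_get?, h]; rfl
  rw [PySem.Dict.items_insert_of_contains _ v hc]
  rfl

theorem pv_get?_remapStep (remap : PySem.Dict String String) (d k s : String) :
    PySem.Dict.get? (pvRemapStep remap d k) s
      = match PySem.Dict.get? remap s with
        | some v => some (if v == d then k else v)
        | none => if s == d then some k else none := by
  unfold pvRemapStep
  have hmap : remap.items.map (fun p => if p.2 == d then (p.1, k) else p)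
      = remap.items.map (fun p => (p.1, if p.2 == d then k else p.2)) := by
    apply List.map_congr_left; intro p _; by_cases h : (p.2 == d) <;> simp [h]
  have hmk : (PySem.Dict.mk remap.items) = remap := rfl
  have hget1 : ∀ x, PySem.Dict.get? (PySem.Dict.mk (remap.items.map (fun p => if p.2 == d then (p.1, k) else p))) x
      = (PySem.Dict.get? remap x).map (fun v => if v == d then k else v) := by
    intro x
    rw [hmap, pv_get?_mk_mapVal remap.items (fun v => if v == d then k else v) x]
  by_cases hd : (PySem.Dict.get? remap d).isSome
  · have hcon : (PySem.Dict.mk (remap.items.map (fun p => if p.2 == d then (p.1, k) else p))).contains d = true := by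
      rw [PySem.Dict.contains_eq_isSome_get?, hget1 d]
      cases hh : PySem.Dict.get? remap d with
      | none => rw [hh] at hd; simp at hd
      | some v => simp
    simp only [hcon, if_pos rfl, if_true]
    rw [hget1 s]
    cases hs : PySem.Dict.get? remap s with
    | some v => simp
    | none =>
      simp only [Option.map_none]
      have hsd : (s == d) = false := by
        cases hsd2 : (s == d)
        · rfl
        · exfalso
          have hsd3 : s = d := eq_of_beq hsd2
          rw [hsd3] at hs
          rw [hs] at hd
          simp at hd
      simp [hsd]
  · have hcon : (PySem.Dict.mk (remap.items.map (fun p => if p.2 == d then (p.1, k) else p))).contains d = false := by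
      rw [PySem.Dict.contains_eq_isSome_get?, hget1 d]
      cases hh : PySem.Dict.get? remap d with
      | none => simp
      | some v => rw [hh] at hd; simp at hd
    simp only [hcon, Bool.false_eq_true, if_false]
    rw [pv_get?_mk_append, hget1 s]
    rw [PySem.Dict.get?_mk_cons]
    cases hs : PySem.Dict.get? remap s with
    | some v => simp
    | none =>
      simp only [Option.map_none, Option.or]
      rw [pv_beq_comm d s]
      cases hsd : (s == d) <;> simp [PySem.Dict.get?]

def pvFld (key d k : String) (r : List (String × String)) : List (String × String) :=
  match PySem.Dict.get? (PySem.Dict.mk r) key with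
  | some s => if s == d then pvSetAll key k r else r
  | none => r

def pvFldAp (key : String) (remap : PySem.Dict String String) (r : List (String × String)) : List (String × String) :=
  match PySem.Dict.get? (PySem.Dict.mk r) key with
  | some s =>
    match PySem.Dict.get? remap s with
    | some v => pvSetAll key v r
    | none => r
  | none => r

theorem pv_rewireA_eq (d k : String) (r : List (String × String)) :
    pvRewireA d k r = pvFld "target" d k (pvFld "source" d k r) := by
  unfold pvRewireA pvFld
  cases hs : PySem.Dict.get? (PySem.Dict.mk r) "source" with
  | none =>
    simp only [hs]
    cases ht : PySem.Dict.get? (PySem.Dict.mk r) "target" with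
    | none => simp [ht]
    | some t =>
      simp only [ht]
      by_cases htd : (t == d)
      · simp only [htd, if_true]
        rw [pv_insert_items_eq_setAll r "target" k t ht]
      · simp [htd]
  | some s =>
    by_cases hsd : (s == d)
    · simp only [hs, hsd, if_true]
      rw [pv_insert_items_eq_setAll r "source" k s hs]
      cases ht : PySem.Dict.get? (PySem.Dict.mk (pvSetAll "source" k r)) "target" with
      | none => simp [ht]
      | some t =>
        simp only [ht]
        by_cases htd : (t == d)
        · simp only [htd, if_true]
          rw [pv_insert_items_eq_setAll _ "target" k t ht]
        · simp [htd]
    · simp only [hs, hsd, Bool.false_eq_true, if_false]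
      cases ht : PySem.Dict.get? (PySem.Dict.mk r) "target" with
      | none => simp [ht]
      | some t =>
        simp only [ht]
        by_cases htd : (t == d)
        · simp only [htd, if_true]
          rw [pv_insert_items_eq_setAll r "target" k t ht]
        · simp [htd]

theorem pv_applyRemap_eq (remap : PySem.Dict String String) (r : List (String × String)) :
    pvApplyRemap remap r = pvFldAp "target" remap (pvFldAp "source" remap r) := by
  unfold pvApplyRemap pvFldAp
  cases hs : PySem.Dict.get? (PySem.Dict.mk r) "source" with
  | none =>
    simp only [hs]
    cases ht : PySem.Dict.get? (PySem.Dict.mk r) "target" with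
    | none => simp [ht]
    | some t =>
      simp only [ht]
      cases hv : PySem.Dict.get? remap t with
      | none => simp [hv]
      | some v =>
        simp only [hv]
        rw [pv_insert_items_eq_setAll r "target" v t ht]
  | some s =>
    cases hv : PySem.Dict.get? remap s with
    | none =>
      simp only [hs, hv]
      cases ht : PySem.Dict.get? (PySem.Dict.mk r) "target" with
      | none => simp [ht]
      | some t =>
        simp only [ht]
        cases hw : PySem.Dict.get? remap t with
        | none => simp [hw]
        | some w =>
          simp only [hw]
          rw [pv_insert_items_eq_setAll r "target" w t ht]
    | some v =>
      simp only [hs, hv]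
      rw [pv_insert_items_eq_setAll r "source" v s hs]
      cases ht : PySem.Dict.get? (PySem.Dict.mk (pvSetAll "source" v r)) "target" with
      | none => simp [ht]
      | some t =>
        simp only [ht]
        cases hw : PySem.Dict.get? remap t with
        | none => simp [hw]
        | some w =>
          simp only [hw]
          rw [pv_insert_items_eq_setAll _ "target" w t ht]

-- the one-field form of A's inner loop body rewritten as an insert of setAll
theorem pv_fld_eq_insert (key d k : String) (r : List (String × String)) (s : String)
    (hs : PySem.Dict.get? (PySem.Dict.mk r) key = some s) :
    pvFld key d k r = if s == d then pvSetAll key k r else r := by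
  unfold pvFld; rw [hs]

theorem pv_fld_fldAp (key d k : String) (remap : PySem.Dict String String) (r : List (String × String)) :
    pvFld key d k (pvFldAp key remap r) = pvFldAp key (pvRemapStep remap d k) r := by
  cases hs : PySem.Dict.get? (PySem.Dict.mk r) key with
  | none =>
    have h1 : pvFldAp key remap r = r := by unfold pvFldAp; rw [hs]
    have h2 : pvFldAp key (pvRemapStep remap d k) r = r := by unfold pvFldAp; rw [hs]
    have h3 : pvFld key d k r = r := by unfold pvFld; rw [hs]
    rw [h1, h3, h2]
  | some s =>
    cases hv : PySem.Dict.get? remap s with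
    | none =>
      have h1 : pvFldAp key remap r = r := by unfold pvFldAp; simp only [hs, hv]
      rw [h1]
      have hrs : PySem.Dict.get? (pvRemapStep remap d k) s = if s == d then some k else none := by
        rw [pv_get?_remapStep, hv]
      by_cases hsd : (s == d)
      · have h2 : pvFldAp key (pvRemapStep remap d k) r = pvSetAll key k r := by
          unfold pvFldAp; simp only [hs, hrs]; simp [hsd]
        rw [h2, pv_fld_eq_insert key d k r s hs]
        simp [hsd]
      · have h2 : pvFldAp key (pvRemapStep remap d k) r = r := by
          unfold pvFldAp; simp only [hs, hrs]; simp [hsd]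
        rw [h2, pv_fld_eq_insert key d k r s hs]
        simp [hsd]
    | some v =>
      have h1 : pvFldAp key remap r = pvSetAll key v r := by unfold pvFldAp; simp only [hs, hv]
      rw [h1]
      have hget : PySem.Dict.get? (PySem.Dict.mk (pvSetAll key v r)) key = some v := by
        rw [pv_get?_setAll_self, hs]; rfl
      rw [pv_fld_eq_insert key d k _ v hget]
      have hrs : PySem.Dict.get? (pvRemapStep remap d k) s = some (if v == d then k else v) := by
        rw [pv_get?_remapStep, hv]
      have h2 : pvFldAp key (pvRemapStep remap d k) r = pvSetAll key (if v == d then k else v) r := by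
        unfold pvFldAp; simp only [hs, hrs]
      rw [h2]
      by_cases hvd : (v == d)
      · simp only [hvd, if_true]
        rw [pv_setAll_setAll]
      · simp [hvd]

theorem pv_fld_fldAp_comm (k1 k2 d k : String) (remap : PySem.Dict String String)
    (r : List (String × String)) (h12 : k1 ≠ k2) :
    pvFld k1 d k (pvFldAp k2 remap r) = pvFldAp k2 remap (pvFld k1 d k r) := by
  cases hs2 : PySem.Dict.get? (PySem.Dict.mk r) k2 with
  | none =>
    have hA : pvFldAp k2 remap r = r := by unfold pvFldAp; rw [hs2]
    rw [hA]
    cases hs1 : PySem.Dict.get? (PySem.Dict.mk r) k1 with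
    | none =>
      have hF : pvFld k1 d k r = r := by unfold pvFld; rw [hs1]
      rw [hF, hA]
    | some s =>
      rw [pv_fld_eq_insert k1 d k r s hs1]
      by_cases hsd : (s == d)
      · simp only [hsd, if_true]
        have hg : PySem.Dict.get? (PySem.Dict.mk (pvSetAll k1 k r)) k2 = none := by
          rw [pv_get?_setAll_ne r k1 k k2 (Ne.symm h12), hs2]
        have hA2 : pvFldAp k2 remap (pvSetAll k1 k r) = pvSetAll k1 k r := by
          unfold pvFldAp; rw [hg]
        rw [hA2]
      · simp only [hsd, Bool.false_eq_true, if_false]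
        rw [hA]
  | some t =>
    cases hv : PySem.Dict.get? remap t with
    | none =>
      have hA : pvFldAp k2 remap r = r := by unfold pvFldAp; simp only [hs2, hv]
      rw [hA]
      cases hs1 : PySem.Dict.get? (PySem.Dict.mk r) k1 with
      | none =>
        have hF : pvFld k1 d k r = r := by unfold pvFld; rw [hs1]
        rw [hF, hA]
      | some s =>
        rw [pv_fld_eq_insert k1 d k r s hs1]
        by_cases hsd : (s == d)
        · simp only [hsd, if_true]
          have hg : PySem.Dict.get? (PySem.Dict.mk (pvSetAll k1 k r)) k2 = some t := by
            rw [pv_get?_setAll_ne r k1 k k2 (Ne.symm h12), hs2]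
          have hA2 : pvFldAp k2 remap (pvSetAll k1 k r) = pvSetAll k1 k r := by
            unfold pvFldAp; simp only [hg, hv]
          rw [hA2]
        · simp only [hsd, Bool.false_eq_true, if_false]
          rw [hA]
    | some v =>
      have hA : pvFldAp k2 remap r = pvSetAll k2 v r := by unfold pvFldAp; simp only [hs2, hv]
      rw [hA]
      cases hs1 : PySem.Dict.get? (PySem.Dict.mk r) k1 with
      | none =>
        have hF : pvFld k1 d k r = r := by unfold pvFld; rw [hs1]
        have hF2 : pvFld k1 d k (pvSetAll k2 v r) = pvSetAll k2 v r := by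
          unfold pvFld; rw [pv_get?_setAll_ne r k2 v k1 h12, hs1]
        rw [hF2, hF, hA]
      | some s =>
        have hg1 : PySem.Dict.get? (PySem.Dict.mk (pvSetAll k2 v r)) k1 = some s := by
          rw [pv_get?_setAll_ne r k2 v k1 h12, hs1]
        rw [pv_fld_eq_insert k1 d k _ s hg1, pv_fld_eq_insert k1 d k r s hs1]
        by_cases hsd : (s == d)
        · simp only [hsd, if_true]
          have hg2 : PySem.Dict.get? (PySem.Dict.mk (pvSetAll k1 k r)) k2 = some t := by
            rw [pv_get?_setAll_ne r k1 k k2 (Ne.symm h12), hs2]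
          have hA2 : pvFldAp k2 remap (pvSetAll k1 k r) = pvSetAll k2 v (pvSetAll k1 k r) := by
            unfold pvFldAp; simp only [hg2, hv]
          rw [hA2, pv_setAll_comm r k1 k2 k v h12]
        · simp only [hsd, Bool.false_eq_true, if_false]
          rw [hA]

theorem pv_rewire_apply (d k : String) (remap : PySem.Dict String String) (r : List (String × String)) :
    pvRewireA d k (pvApplyRemap remap r) = pvApplyRemap (pvRemapStep remap d k) r := by
  rw [pv_applyRemap_eq, pv_rewireA_eq, pv_applyRemap_eq]
  rw [pv_fld_fldAp_comm "source" "target" d k remap _ (by decide)]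
  rw [pv_fld_fldAp "source" d k remap r]
  rw [pv_fld_fldAp "target" d k remap _]

theorem pv_applyRemap_empty (r : List (String × String)) :
    pvApplyRemap PySem.Dict.empty r = r := by
  unfold pvApplyRemap
  cases hs : PySem.Dict.get? (PySem.Dict.mk r) "source" with
  | none =>
    simp only [hs]
    cases ht : PySem.Dict.get? (PySem.Dict.mk r) "target" with
    | none => simp [ht]
    | some t => simp [ht, PySem.Dict.get?_empty]
  | some s =>
    simp only [hs, PySem.Dict.get?_empty]
    cases ht : PySem.Dict.get? (PySem.Dict.mk r) "target" with
    | none => simp [ht]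
    | some t => simp [ht, PySem.Dict.get?_empty]

-- ---------- entity layer: first-alive search vs search over the filtered list ----------
def pvFA (q : List (String × String) → Bool) :
    Nat → List (List (String × String)) → List Bool → Option (Nat × List (String × String))
  | _, [], _ => none
  | _, _ :: _, [] => none
  | j, e :: es, b :: bs => if b && q e then some (j, e) else pvFA q (j+1) es bs

theorem pvAF_nil (bs : List Bool) : pvAliveFilter [] bs = [] := by simp [pvAliveFilter]

theorem pvAF_cons (e : List (String × String)) (es : List (List (String × String))) (b : Bool) (bs : List Bool) :
    pvAliveFilter (e :: es) (b :: bs) = if b then e :: pvAliveFilter es bs else pvAliveFilter es bs := by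
  by_cases hb : b <;> simp [pvAliveFilter, hb]

theorem pvAF_replicate (es : List (List (String × String))) :
    pvAliveFilter es (List.replicate es.length true) = es := by
  induction es with
  | nil => simp [pvAliveFilter]
  | cons e es ih => rw [List.length_cons, List.replicate_succ, pvAF_cons]; simp [ih]

theorem pv_firstAlive_aux (E : List (List (String × String))) (A : List Bool) (q : List (String × String) → Bool) :
    ∀ n j, n = E.length - j → j ≤ E.length → A.length = E.length →
    (List.range' j n).find? (fun i => A.getD i false && q (E.getD i [])) = (pvFA q j (E.drop j) (A.drop j)).map (·.1) := by
  intro n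
  induction n with
  | zero =>
    intro j hn hj hl
    have hjE : j = E.length := by omega
    have h1 : E.drop j = [] := by rw [List.drop_eq_nil_iff]; omega
    have h2 : A.drop j = [] := by rw [List.drop_eq_nil_iff]; omega
    rw [h1, h2]
    simp [pvFA]
  | succ m ih =>
    intro j hn hj hl
    have hjE : j < E.length := by omega
    have hjA : j < A.length := by omega
    rw [List.range'_succ, List.find?_cons]
    rw [List.drop_eq_getElem_cons hjE, List.drop_eq_getElem_cons hjA]
    rw [List.getD_eq_getElem A false hjA, List.getD_eq_getElem E [] hjE]
    by_cases hc : A[j] && q E[j]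
    · simp only [pvFA, hc]
      simp
    · have hc' : (A[j] && q E[j]) = false := by simpa using hc
      simp only [pvFA, hc', Bool.false_eq_true, if_false]
      exact ih (j+1) (by omega) (by omega) hl

theorem pv_firstAlive_eq (entities : List (List (String × String))) (alive : List Bool) (nm : String)
    (hl : alive.length = entities.length) :
    pvFirstAlive entities alive nm
      = (pvFA (fun e => pvName e == nm) 0 entities alive).map (·.1) := by
  unfold pvFirstAlive
  rw [List.range_eq_range']
  have := pv_firstAlive_aux entities alive (fun e => pvName e == nm) entities.length 0 (by omega) (by omega) hl
  simpa using this

theorem pvFA_spec (q : List (String × String) → Bool) :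
    ∀ (es : List (List (String × String))) (bs : List Bool) (j i : Nat) (e : List (String × String)),
    bs.length = es.length → pvFA q j es bs = some (i, e) →
    j ≤ i ∧ i - j < es.length ∧ es.getD (i - j) [] = e ∧ bs.getD (i - j) false = true ∧ q e = true := by
  intro es
  induction es with
  | nil => intro bs j i e _ h; simp [pvFA] at h
  | cons e0 es ih =>
    intro bs j i e hl h
    cases bs with
    | nil => simp at hl
    | cons b bs =>
      unfold pvFA at h
      by_cases hc : b && q e0
      · rw [if_pos hc] at h
        have hje : j = i ∧ e0 = e := by simpa using h
        obtain ⟨h1, h2⟩ := hje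
        subst h1; subst h2
        refine ⟨le_refl _, by simp, by simp, ?_, ?_⟩
        · simp only [Nat.sub_self, List.getD_cons_zero]
          exact ((Bool.and_eq_true _ _).mp hc).1
        · exact ((Bool.and_eq_true _ _).mp hc).2
      · rw [if_neg hc] at h
        have hl' : bs.length = es.length := by simpa using hl
        obtain ⟨hji, hlt, hget, hbs, hq⟩ := ih bs (j+1) i e hl' h
        have hij : j + 1 ≤ i := hji
        have hsub : i - j = (i - (j+1)) + 1 := by omega
        refine ⟨by omega, by simp; omega, ?_, ?_, hq⟩
        · rw [hsub, List.getD_cons_succ]; exact hget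
        · rw [hsub, List.getD_cons_succ]; exact hbs

theorem pv_enumFind {α : Type} (q : α → Bool) :
    ∀ (l : List α) (s : Int),
    ((PySem.List.enumerate l s).find? (fun p => q p.2)).map (·.1)
      = (l.findIdx? q).map (fun n => s + (n : Int)) := by
  intro l
  induction l with
  | nil => intro s; simp [PySem.List.enumerate_nil]
  | cons x t ih =>
    intro s
    rw [PySem.List.enumerate_cons, List.find?_cons, List.findIdx?_cons]
    by_cases hq : q x
    · simp [hq]
    · have hq' : (q x) = false := by simpa using hq
      simp only [hq', Bool.false_eq_true, if_false]
      rw [ih (s+1)]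
      cases hfi : t.findIdx? q with
      | none => simp
      | some n => simp; omega

theorem pv_findIdxA_eq (l : List (List (String × String))) (nm : String) :
    pvFindIdxA l nm = (l.findIdx? (fun e => pvName e == nm)).map (fun n => (n : Int)) := by
  unfold pvFindIdxA
  rw [pv_enumFind (fun e => pvName e == nm) l 0]
  simp

theorem pvMain (q : List (String × String) → Bool) :
    ∀ (es : List (List (String × String))) (bs : List Bool), bs.length = es.length → ∀ j,
    ((pvAliveFilter es bs).findIdx? q = none ∧ pvFA q j es bs = none) ∨
    (∃ n i e, (pvAliveFilter es bs).findIdx? q = some n ∧ pvFA q j es bs = some (i, e) ∧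
      n < (pvAliveFilter es bs).length ∧ (pvAliveFilter es bs).getD n [] = e ∧
      j ≤ i ∧ i - j < bs.length ∧
      (pvAliveFilter es bs).eraseIdx n = pvAliveFilter es (bs.set (i - j) false)) := by
  intro es
  induction es with
  | nil =>
    intro bs hl j
    left
    have : bs = [] := by simpa using hl
    subst this
    constructor
    · simp [pvAF_nil]
    · simp [pvFA]
  | cons e0 es ih =>
    intro bs hl j
    cases bs with
    | nil => simp at hl
    | cons b bs =>
      have hl' : bs.length = es.length := by simpa using hl
      rw [pvAF_cons]
      by_cases hb : b
      · rw [if_pos hb]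
        by_cases hq : q e0
        · right
          refine ⟨0, j, e0, ?_, ?_, by simp, by simp, le_refl _, by simp, ?_⟩
          · rw [List.findIdx?_cons, if_pos hq]
          · unfold pvFA; rw [if_pos (by simp [hb, hq])]
          · simp only [Nat.sub_self, List.eraseIdx_cons_zero]
            rw [show (b :: bs).set 0 false = false :: bs from by simp, pvAF_cons]
            simp
        · have hq' : (q e0) = false := by simpa using hq
          rcases ih bs hl' (j+1) with ⟨hA, hB⟩ | ⟨n, i, e, hA, hB, hn, hget, hji, hib, herase⟩
          · left
            constructor
            · rw [List.findIdx?_cons, if_neg (by simp [hq']), hA]; rfl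
            · unfold pvFA; rw [if_neg (by simp [hq']), hB]
          · right
            refine ⟨n+1, i, e, ?_, ?_, by simpa using hn, by simpa using hget, by omega, by simp; omega, ?_⟩
            · rw [List.findIdx?_cons, if_neg (by simp [hq']), hA]; rfl
            · unfold pvFA; rw [if_neg (by simp [hq']), hB]
            · rw [List.eraseIdx_cons_succ]
              have hsub : i - j = (i - (j+1)) + 1 := by omega
              rw [hsub, List.set_cons_succ, pvAF_cons, if_pos hb, herase]
      · rw [if_neg hb]
        have hb' : b = false := by simpa using hb
        rcases ih bs hl' (j+1) with ⟨hA, hB⟩ | ⟨n, i, e, hA, hB, hn, hget, hji, hib, herase⟩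
        · left
          constructor
          · exact hA
          · unfold pvFA; rw [if_neg (by simp [hb']), hB]
        · right
          refine ⟨n, i, e, hA, ?_, hn, hget, by omega, by simp; omega, ?_⟩
          · unfold pvFA; rw [if_neg (by simp [hb']), hB]
          · have hsub : i - j = (i - (j+1)) + 1 := by omega
            rw [hsub, List.set_cons_succ, pvAF_cons, if_neg hb, herase]

theorem pvEqIdx (q1 q2 : List (String × String) → Bool) :
    ∀ (es : List (List (String × String))) (bs : List Bool), bs.length = es.length →
    ∀ j n1 i1 e1 n2 i2 e2,
    (pvAliveFilter es bs).findIdx? q1 = some n1 → pvFA q1 j es bs = some (i1, e1) →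
    (pvAliveFilter es bs).findIdx? q2 = some n2 → pvFA q2 j es bs = some (i2, e2) →
    ((n1 = n2) ↔ (i1 = i2)) := by
  intro es
  induction es with
  | nil =>
    intro bs hl j n1 i1 e1 n2 i2 e2 _ hB1 _ _
    simp [pvFA] at hB1
  | cons e0 es ih =>
    intro bs hl j n1 i1 e1 n2 i2 e2 hA1 hB1 hA2 hB2
    cases bs with
    | nil => simp at hl
    | cons b bs =>
      have hl' : bs.length = es.length := by simpa using hl
      rw [pvAF_cons] at hA1 hA2
      unfold pvFA at hB1 hB2
      by_cases hb : b
      · rw [if_pos hb] at hA1 hA2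
        rw [List.findIdx?_cons] at hA1 hA2
        by_cases hq1 : q1 e0
        · rw [if_pos hq1] at hA1
          rw [if_pos (by simp [hb, hq1])] at hB1
          have hn1 : n1 = 0 := by simpa using hA1.symm
          have hi1 : i1 = j := by
            have h := hB1
            simp only [Option.some.injEq, Prod.mk.injEq] at h
            exact h.1.symm
          by_cases hq2 : q2 e0
          · rw [if_pos hq2] at hA2
            rw [if_pos (by simp [hb, hq2])] at hB2
            have hn2 : n2 = 0 := by simpa using hA2.symm
            have hi2 : i2 = j := by
              have h := hB2
              simp only [Option.some.injEq, Prod.mk.injEq] at h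
              exact h.1.symm
            simp [hn1, hn2, hi1, hi2]
          · rw [if_neg (by simpa using hq2)] at hA2
            rw [if_neg (by simp [hq2])] at hB2
            obtain ⟨hji2, _, _, _, _⟩ := pvFA_spec q2 es bs (j+1) i2 e2 hl' hB2
            cases hm : (pvAliveFilter es bs).findIdx? q2 with
            | none => rw [hm] at hA2; simp at hA2
            | some m =>
              rw [hm] at hA2
              have hn2 : n2 = m + 1 := by simpa using hA2.symm
              constructor
              · intro h; omega
              · intro h; omega
        · rw [if_neg (by simpa using hq1)] at hA1
          rw [if_neg (by simp [hq1])] at hB1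
          obtain ⟨hji1, _, _, _, _⟩ := pvFA_spec q1 es bs (j+1) i1 e1 hl' hB1
          by_cases hq2 : q2 e0
          · rw [if_pos hq2] at hA2
            rw [if_pos (by simp [hb, hq2])] at hB2
            have hn2 : n2 = 0 := by simpa using hA2.symm
            have hi2 : i2 = j := by
              have h := hB2
              simp only [Option.some.injEq, Prod.mk.injEq] at h
              exact h.1.symm
            cases hm : (pvAliveFilter es bs).findIdx? q1 with
            | none => rw [hm] at hA1; simp at hA1
            | some m =>
              rw [hm] at hA1
              have hn1 : n1 = m + 1 := by simpa using hA1.symm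
              constructor
              · intro h; omega
              · intro h; omega
          · rw [if_neg (by simpa using hq2)] at hA2
            rw [if_neg (by simp [hq2])] at hB2
            cases hm1 : (pvAliveFilter es bs).findIdx? q1 with
            | none => rw [hm1] at hA1; simp at hA1
            | some m1 =>
              cases hm2 : (pvAliveFilter es bs).findIdx? q2 with
              | none => rw [hm2] at hA2; simp at hA2
              | some m2 =>
                rw [hm1] at hA1; rw [hm2] at hA2
                have hn1 : n1 = m1 + 1 := by simpa using hA1.symm
                have hn2 : n2 = m2 + 1 := by simpa using hA2.symm
                have := ih bs hl' (j+1) m1 i1 e1 m2 i2 e2 hm1 hB1 hm2 hB2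
                omega
      · rw [if_neg hb] at hA1 hA2
        have hb' : b = false := by simpa using hb
        rw [if_neg (by simp [hb'])] at hB1
        rw [if_neg (by simp [hb'])] at hB2
        exact ih bs hl' (j+1) n1 i1 e1 n2 i2 e2 hA1 hB1 hA2 hB2

-- ---------- the per-pair step preserves the simulation invariant ----------
theorem pv_entity_mem (entities : List (List (String × String))) (i : Nat) (e : List (String × String))
    (hlt : i < entities.length) (hget : entities.getD i [] = e) : e ∈ entities := by
  rw [List.getD_eq_getElem entities [] hlt] at hget
  exact hget ▸ List.getElem_mem hlt

theorem pvStep_inv (entities relations : List (List (String × String))) (duplicates : List (List String))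
    (hPre : Pre_apply_duplicate_merges_py entities relations duplicates)
    (pair : List String) (hmem : pair ∈ duplicates)
    (alive : List Bool) (remap : PySem.Dict String String)
    (hlen : alive.length = entities.length) :
    pvStepA (pvAliveFilter entities alive, relations.map (pvApplyRemap remap)) pair
      = (pvAliveFilter entities (pvStepB entities (alive, remap) pair).1,
         relations.map (pvApplyRemap (pvStepB entities (alive, remap) pair).2))
    ∧ (pvStepB entities (alive, remap) pair).1.length = entities.length := by
  by_cases hp : pair.length < 2
  · constructor
    · unfold pvStepA pvStepB; rw [if_pos hp, if_pos hp]
    · unfold pvStepB; rw [if_pos hp]; exact hlen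
  · unfold pvStepA pvStepB
    rw [if_neg hp, if_neg hp]
    simp only []
    set na := PySem.Str.lower (PySem.List.pyGetD pair 0 "") with hna
    set nb := PySem.Str.lower (PySem.List.pyGetD pair 1 "") with hnb
    rcases pvMain (fun e => pvName e == na) entities alive hlen 0 with
      ⟨hAa, hBa⟩ | ⟨n1, i1, e1, hAa, hBa, hn1, hget1, _, hib1, herase1⟩
    · -- idx_a is None on both sides
      have hFA : pvFindIdxA (pvAliveFilter entities alive) na = none := by
        rw [pv_findIdxA_eq, hAa]; rfl
      have hFB : pvFirstAlive entities alive na = none := by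
        rw [pv_firstAlive_eq _ _ _ hlen, hBa]; rfl
      simp only [hFA, hFB]
      cases hFB2 : pvFirstAlive entities alive nb with
      | none => exact ⟨by trivial, hlen⟩
      | some ib => exact ⟨by trivial, hlen⟩
    · have hFA : pvFindIdxA (pvAliveFilter entities alive) na = some ((n1 : Int)) := by
        rw [pv_findIdxA_eq, hAa]; rfl
      have hFB : pvFirstAlive entities alive na = some i1 := by
        rw [pv_firstAlive_eq _ _ _ hlen, hBa]; rfl
      rcases pvMain (fun e => pvName e == nb) entities alive hlen 0 with
        ⟨hAb, hBb⟩ | ⟨n2, i2, e2, hAb, hBb, hn2, hget2, _, hib2, herase2⟩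
      · have hFA2 : pvFindIdxA (pvAliveFilter entities alive) nb = none := by
          rw [pv_findIdxA_eq, hAb]; rfl
        have hFB2 : pvFirstAlive entities alive nb = none := by
          rw [pv_firstAlive_eq _ _ _ hlen, hBb]; rfl
        simp only [hFA, hFB, hFA2, hFB2]
        exact ⟨by trivial, hlen⟩
      · have hFA2 : pvFindIdxA (pvAliveFilter entities alive) nb = some ((n2 : Int)) := by
          rw [pv_findIdxA_eq, hAb]; rfl
        have hFB2 : pvFirstAlive entities alive nb = some i2 := by
          rw [pv_firstAlive_eq _ _ _ hlen, hBb]; rfl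
        simp only [hFA, hFB, hFA2, hFB2]
        have hiff := pvEqIdx (fun e => pvName e == na) (fun e => pvName e == nb) entities alive hlen 0
          n1 i1 e1 n2 i2 e2 hAa hBa hAb hBb
        by_cases hii : i1 = i2
        · have hnn : n1 = n2 := hiff.mpr hii
          have hc1 : ((n1 : Int) == (n2 : Int)) = true := by simp [hnn]
          have hc2 : (i1 == i2) = true := by simp [hii]
          rw [hc1, hc2]
          simp only [if_true]
          exact ⟨by trivial, hlen⟩
        · have hnn : n1 ≠ n2 := fun h => hii (hiff.mp h)
          have hc1 : ((n1 : Int) == (n2 : Int)) = false := by simp [hnn]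
          have hc2 : (i1 == i2) = false := by simp [hii]
          rw [hc1, hc2]
          simp only [Bool.false_eq_true, if_false]
          -- description-length condition is identical on both sides
          obtain ⟨_, hilt1, hgetE1, halive1, hq1⟩ := pvFA_spec (fun e => pvName e == na) entities alive 0 i1 e1 hlen hBa
          obtain ⟨_, hilt2, hgetE2, halive2, hq2⟩ := pvFA_spec (fun e => pvName e == nb) entities alive 0 i2 e2 hlen hBb
          simp only [Nat.sub_zero] at hilt1 hgetE1 hilt2 hgetE2
          have hA1 : PySem.List.pyGetD (pvAliveFilter entities alive) ((n1 : Int)) [] = e1 := by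
            rw [PySem.List.pyGetD_natCast]; exact hget1
          have hA2 : PySem.List.pyGetD (pvAliveFilter entities alive) ((n2 : Int)) [] = e2 := by
            rw [PySem.List.pyGetD_natCast]; exact hget2
          rw [hA1, hA2, hgetE1, hgetE2]
          -- the two matched entities are distinct, so the pair's lowered names are distinct,
          -- and Pre_ gives both entities an "id" key
          have hmem1 : e1 ∈ entities := pv_entity_mem entities i1 e1 hilt1 hgetE1
          have hmem2 : e2 ∈ entities := pv_entity_mem entities i2 e2 hilt2 hgetE2
          have hname1 : pvName e1 = na := by simpa using hq1
          have hname2 : pvName e2 = nb := by simpa using hq2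
          have hg0 : PySem.List.pyGetD pair 0 "" = pair.getD 0 "" := PySem.List.pyGetD_ofNat' pair 0 ""
          have hg1 : PySem.List.pyGetD pair 1 "" = pair.getD 1 "" := PySem.List.pyGetD_ofNat' pair 1 ""
          have hnab : na ≠ nb := by
            intro h
            apply hii
            have hsame : pvFA (fun e => pvName e == na) 0 entities alive
                = pvFA (fun e => pvName e == nb) 0 entities alive := by rw [h]
            rw [hBa, hBb] at hsame
            have h12 : i1 = i2 ∧ e1 = e2 := by simpa using hsame
            exact h12.1
          have hnab' : PySem.Str.lower (pair.getD 0 "") ≠ PySem.Str.lower (pair.getD 1 "") := by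
            rw [← hg0, ← hg1, ← hna, ← hnb]; exact hnab
          have hids := hPre pair hmem (by omega) hnab' e1 hmem1 e2 hmem2
            (by rw [hname1, hna, hg0]) (by rw [hname2, hnb, hg1])
          have hid1 := hids.1
          have hid2 := hids.2
          rw [PySem.Dict.contains_eq_isSome_get?] at hid1 hid2
          obtain ⟨id1, hid1⟩ := Option.isSome_iff_exists.mp hid1
          obtain ⟨id2, hid2⟩ := Option.isSome_iff_exists.mp hid2
          by_cases hdesc : pvDescLen e1 ≥ pvDescLen e2
          · rw [if_pos hdesc, if_pos hdesc]
            simp only [hA2, hA1, hgetE1, hgetE2, hid1, hid2]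
            constructor
            · have hpop : PySem.List.pop? (pvAliveFilter entities alive) ((n2 : Int))
                  = some ((pvAliveFilter entities alive)[n2], (pvAliveFilter entities alive).eraseIdx n2) :=
                PySem.List.pop?_natCast (pvAliveFilter entities alive) n2 hn2
              rw [hpop]
              simp only [Nat.sub_zero] at herase2
              rw [Prod.mk.injEq]
              refine ⟨herase2, ?_⟩
              rw [List.map_map]
              apply List.map_congr_left
              intro r _
              exact pv_rewire_apply id2 id1 remap r
            · rw [List.length_set]; exact hlen
          · rw [if_neg hdesc, if_neg hdesc]
            simp only [hA2, hA1, hgetE1, hgetE2, hid1, hid2]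
            constructor
            · have hpop : PySem.List.pop? (pvAliveFilter entities alive) ((n1 : Int))
                  = some ((pvAliveFilter entities alive)[n1], (pvAliveFilter entities alive).eraseIdx n1) :=
                PySem.List.pop?_natCast (pvAliveFilter entities alive) n1 hn1
              rw [hpop]
              simp only [Nat.sub_zero] at herase1
              rw [Prod.mk.injEq]
              refine ⟨herase1, ?_⟩
              rw [List.map_map]
              apply List.map_congr_left
              intro r _
              exact pv_rewire_apply id1 id2 remap r
            · rw [List.length_set]; exact hlen

theorem pvFold (entities relations : List (List (String × String))) (duplicates : List (List String))
    (hPre : Pre_apply_duplicate_merges_py entities relations duplicates) :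
    ∀ (dups : List (List String)), (∀ p ∈ dups, p ∈ duplicates) →
    ∀ (alive : List Bool) (remap : PySem.Dict String String), alive.length = entities.length →
    List.foldl pvStepA (pvAliveFilter entities alive, relations.map (pvApplyRemap remap)) dups
      = (pvAliveFilter entities (List.foldl (pvStepB entities) (alive, remap) dups).1,
         relations.map (pvApplyRemap (List.foldl (pvStepB entities) (alive, remap) dups).2)) := by
  intro dups
  induction dups with
  | nil => intro _ alive remap _; simp
  | cons p dups ih =>
    intro hsub alive remap hlen
    obtain ⟨hstep, hlen'⟩ := pvStep_inv entities relations duplicates hPre p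
      (hsub p (List.mem_cons_self)) alive remap hlen
    rw [List.foldl_cons, List.foldl_cons, hstep]
    have hB : pvStepB entities (alive, remap) p
        = ((pvStepB entities (alive, remap) p).1, (pvStepB entities (alive, remap) p).2) := rfl
    rw [hB]
    exact ih (fun q hq => hsub q (List.mem_cons_of_mem p hq))
      (pvStepB entities (alive, remap) p).1 (pvStepB entities (alive, remap) p).2 hlen'

-- ===== VERDICT (by name: the statement is the Claim_ definition above) =====
theorem apply_duplicate_merges_py_spec : Claim_equal_apply_duplicate_merges_py := by
  intro entities relations duplicates _ hPre
  unfold Spec_apply_duplicate_merges_py apply_duplicate_merges_py apply_duplicate_merges_py_alt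
  have h0 : entities = pvAliveFilter entities (List.replicate entities.length true) :=
    (pvAF_replicate entities).symm
  have h1 : relations = relations.map (pvApplyRemap PySem.Dict.empty) := by
    rw [List.map_congr_left (fun r _ => pv_applyRemap_empty r), List.map_id']
  conv_lhs => rw [h0, h1]
  exact pvFold entities relations duplicates hPre duplicates (fun _ h => h)
    (List.replicate entities.length true) PySem.Dict.empty (by simp)
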